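-- pv_equiv track=rewrite | github.com/SvenjaCSch/topic_segmentation_news | Tkinter.py | convert_data_to_integer
-- ===== SOURCE A (Python) =====
-- def convert_data_to_integer(train_text, test_text):
--     idx = 1
--     word2idx = {"<unk>":0}
--
--     for text in train_text:
--         tokens = text.split()
--         for token in tokens:
--             if token not in word2idx:
--                 word2idx[token] = idx
--                 idx += 1
--
--     train_text_int = []
--     test_text_int = []
--
--     for text in train_text:
--         tokens = text.split()
--         line_as_int = [word2idx[token] for token in tokens]
--         train_text_int.append(line_as_int)
--
--     for text in test_text:
--         tokens = text.split()
--         line_as_int = [word2idx.get(token,0) for token in tokens]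
--         test_text_int.append(line_as_int)
--     return word2idx, train_text_int, test_text_int
-- ===== SOURCE B (Python) =====
-- def convert_data_to_integer(train_text, test_text):
--     # Single fused pass: build the vocabulary while converting the train lines,
--     # using len(word2idx) as the next index instead of a separate counter pass.
--     word2idx = {"<unk>": 0}
--     train_text_int = []
--     for text in train_text:
--         line = []
--         for token in text.split():
--             if token not in word2idx:
--                 word2idx[token] = len(word2idx)
--             line.append(word2idx[token])
--         train_text_int.append(line)
--     test_text_int = [[word2idx.get(token, 0) for token in text.split()]
--                      for text in test_text]
--     return word2idx, train_text_int, test_text_int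
-- ===== Notes on version B (the rewrite author's own statement) =====
-- stated objective: simpler
-- what changed: B fuses A's separate vocabulary-building pass and train-conversion pass into one loop over train_text, dropping the explicit idx counter in favour of len(word2idx); test conversion stays a comprehension.
import Mathlib
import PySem

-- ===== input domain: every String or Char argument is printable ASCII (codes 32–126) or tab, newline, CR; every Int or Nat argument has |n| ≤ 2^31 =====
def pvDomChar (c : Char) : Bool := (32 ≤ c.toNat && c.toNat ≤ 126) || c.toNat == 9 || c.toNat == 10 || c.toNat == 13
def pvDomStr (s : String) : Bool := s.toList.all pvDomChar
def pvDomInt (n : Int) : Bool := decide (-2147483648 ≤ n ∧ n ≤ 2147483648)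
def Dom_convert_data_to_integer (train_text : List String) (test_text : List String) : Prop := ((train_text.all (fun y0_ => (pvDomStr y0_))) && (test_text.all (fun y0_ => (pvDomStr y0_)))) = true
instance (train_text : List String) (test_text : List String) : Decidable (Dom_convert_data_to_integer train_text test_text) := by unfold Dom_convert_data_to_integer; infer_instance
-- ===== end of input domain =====

-- B fuses A's separate vocabulary-building pass and train-conversion pass into one loop over
-- train_text (next index = len(word2idx) instead of an explicit counter); same values, simpler code.

-- ===== PORT A =====
-- state (idx, word2idx); `if token not in word2idx: word2idx[token] = idx; idx += 1`
def pyBuildTok (p : Int × PySem.Dict String Int) (tok : String) : Int × PySem.Dict String Int :=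
  if p.2.contains tok = false then (p.1 + 1, p.2.insert tok p.1) else p

def convert_data_to_integer (train_text : List String) (test_text : List String) :
    (List (String × Int)) × List (List Int) × List (List Int) :=
  let st := train_text.foldl (fun p text => (PySem.Str.split₀ text).foldl pyBuildTok p)
              (1, (PySem.Dict.empty).insert "<unk>" 0)
  let w := st.2
  (w.items,
   -- word2idx[token]: every train token is a key of word2idx, so the KeyError branch is unreachable
   train_text.map (fun text => (PySem.Str.split₀ text).map (fun tok => w.getD tok 0)),
   test_text.map (fun text => (PySem.Str.split₀ text).map (fun tok => w.getD tok 0)))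

-- ===== PORT B =====
-- fused per-token step: state (word2idx, line); insert len(word2idx) if absent, then append the lookup
def altTok (p : PySem.Dict String Int × List Int) (tok : String) : PySem.Dict String Int × List Int :=
  let d := if p.1.contains tok = false then p.1.insert tok ((p.1.size : Int)) else p.1
  (d, p.2 ++ [d.getD tok 0])

def altText (p : PySem.Dict String Int × List (List Int)) (text : String) :
    PySem.Dict String Int × List (List Int) :=
  let q := (PySem.Str.split₀ text).foldl altTok (p.1, [])
  (q.1, p.2 ++ [q.2])

def convert_data_to_integer_alt (train_text : List String) (test_text : List String) :
    (List (String × Int)) × List (List Int) × List (List Int) :=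
  let r := train_text.foldl altText ((PySem.Dict.empty).insert "<unk>" 0, [])
  (r.1.items, r.2,
   test_text.map (fun text => (PySem.Str.split₀ text).map (fun tok => r.1.getD tok 0)))

-- ===== PRECONDITION & SPEC =====
def Spec_convert_data_to_integer (train_text : List String) (test_text : List String) (out : (List (String × Int)) × List (List Int) × List (List Int)) : Prop := out = convert_data_to_integer_alt train_text test_text
instance (train_text : List String) (test_text : List String) (out : (List (String × Int)) × List (List Int) × List (List Int)) : Decidable (Spec_convert_data_to_integer train_text test_text out) := by unfold Spec_convert_data_to_integer; infer_instance

-- ===== CLAIM (what is proved, stated in full; the proofs are below) =====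
def Claim_equal_convert_data_to_integer : Prop := ∀ (train_text : List String) (test_text : List String), Dom_convert_data_to_integer train_text test_text → Spec_convert_data_to_integer train_text test_text (convert_data_to_integer train_text test_text)

-- ===== LEMMAS AND PROOFS =====

-- d' preserves every binding of d (insertions of fresh keys only ever extend)
def SubD (d d' : PySem.Dict String Int) : Prop := ∀ t v, d.get? t = some v → d'.get? t = some v

theorem subD_refl (d : PySem.Dict String Int) : SubD d d := fun _ _ h => h

theorem subD_trans {d₁ d₂ d₃ : PySem.Dict String Int} (h₁ : SubD d₁ d₂) (h₂ : SubD d₂ d₃) :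
    SubD d₁ d₃ := fun t v h => h₂ t v (h₁ t v h)

theorem subD_insert_fresh (d : PySem.Dict String Int) (k : String) (v : Int)
    (h : d.contains k = false) : SubD d (d.insert k v) := by
  intro t w hw
  rcases eq_or_ne t k with rfl | hne
  · rw [PySem.Dict.contains_eq_isSome_get?, hw] at h; simp at h
  · rw [PySem.Dict.get?_insert_of_ne _ _ hne]; exact hw

-- fused token loop vs A's vocabulary-building token loop
theorem tokLoop (toks : List String) (d : PySem.Dict String Int) (acc : List Int) :
    toks.foldl pyBuildTok ((d.size : Int), d)
      = (((toks.foldl altTok (d, acc)).1.size : Int), (toks.foldl altTok (d, acc)).1)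
    ∧ SubD d (toks.foldl altTok (d, acc)).1
    ∧ ∀ dF, SubD (toks.foldl altTok (d, acc)).1 dF →
        (toks.foldl altTok (d, acc)).2 = acc ++ toks.map (fun t => dF.getD t 0) := by
  induction toks generalizing d acc with
  | nil => exact ⟨rfl, subD_refl d, fun _ _ => by simp⟩
  | cons t toks ih =>
    by_cases h : d.contains t = false
    · -- fresh token: both insert it, A with idx, B with len(word2idx); idx = len by invariant
      have hstepA : pyBuildTok ((d.size : Int), d) t
          = (((d.insert t (d.size : Int)).size : Int), d.insert t (d.size : Int)) := by
        simp [pyBuildTok, h, PySem.Dict.size_insert]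
      have hstepB : altTok (d, acc) t
          = (d.insert t (d.size : Int), acc ++ [(d.size : Int)]) := by
        simp [altTok, h, PySem.Dict.getD_eq_get?_getD, PySem.Dict.get?_insert_self]
      obtain ⟨ih1, ih2, ih3⟩ := ih (d.insert t (d.size : Int)) (acc ++ [(d.size : Int)])
      refine ⟨?_, ?_, ?_⟩
      · simpa [List.foldl_cons, hstepA, hstepB] using ih1
      · simpa [List.foldl_cons, hstepB] using
          subD_trans (subD_insert_fresh d t _ h) ih2
      · intro dF hF
        simp only [List.foldl_cons, hstepB] at hF ⊢
        have h3 := ih3 dF hF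
        have hval : dF.getD t 0 = (d.size : Int) := by
          have : dF.get? t = some (d.size : Int) :=
            hF t _ (ih2 t _ (PySem.Dict.get?_insert_self _ _ _))
          simp [PySem.Dict.getD_eq_get?_getD, this]
        simp [h3, hval]
    · -- token already in the vocabulary: A leaves the state unchanged, B only appends the lookup
      have h' : d.contains t = true := by simpa using h
      obtain ⟨v₀, hv₀⟩ : ∃ v₀, d.get? t = some v₀ := by
        rw [PySem.Dict.contains_eq_isSome_get?] at h'
        exact Option.isSome_iff_exists.mp h'
      have hstepA : pyBuildTok ((d.size : Int), d) t = ((d.size : Int), d) := by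
        simp [pyBuildTok, h']
      have hstepB : altTok (d, acc) t = (d, acc ++ [v₀]) := by
        simp only [altTok, h', Bool.true_eq_false, if_false]
        rw [PySem.Dict.getD_eq_get?_getD, hv₀]
        all_goals simp
      obtain ⟨ih1, ih2, ih3⟩ := ih d (acc ++ [v₀])
      refine ⟨?_, ?_, ?_⟩
      · simpa [List.foldl_cons, hstepA, hstepB] using ih1
      · simpa [List.foldl_cons, hstepB] using ih2
      · intro dF hF
        simp only [List.foldl_cons, hstepB] at hF ⊢
        have h3 := ih3 dF hF
        have hval : dF.getD t 0 = v₀ := by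
          have : dF.get? t = some v₀ := hF t _ (ih2 t _ hv₀)
          simp [PySem.Dict.getD_eq_get?_getD, this]
        simp [h3, hval]

-- fused text loop vs A's vocabulary-building text loop
theorem textLoop (ts : List String) (d : PySem.Dict String Int) (acc : List (List Int)) :
    ts.foldl (fun p text => (PySem.Str.split₀ text).foldl pyBuildTok p) ((d.size : Int), d)
      = (((ts.foldl altText (d, acc)).1.size : Int), (ts.foldl altText (d, acc)).1)
    ∧ SubD d (ts.foldl altText (d, acc)).1
    ∧ ∀ dF, SubD (ts.foldl altText (d, acc)).1 dF →
        (ts.foldl altText (d, acc)).2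
          = acc ++ ts.map (fun text => (PySem.Str.split₀ text).map (fun tok => dF.getD tok 0)) := by
  induction ts generalizing d acc with
  | nil => exact ⟨rfl, subD_refl d, fun _ _ => by simp⟩
  | cons text ts ih =>
    obtain ⟨t1, t2, t3⟩ := tokLoop (PySem.Str.split₀ text) d []
    set q := (PySem.Str.split₀ text).foldl altTok (d, []) with hq
    have hstepB : altText (d, acc) text = (q.1, acc ++ [q.2]) := rfl
    obtain ⟨ih1, ih2, ih3⟩ := ih q.1 (acc ++ [q.2])
    refine ⟨?_, ?_, ?_⟩
    · simpa [List.foldl_cons, hstepB, t1] using ih1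
    · simpa [List.foldl_cons, hstepB] using subD_trans t2 ih2
    · intro dF hF
      simp only [List.foldl_cons, hstepB] at hF ⊢
      have h3 := ih3 dF hF
      have hline : q.2 = (PySem.Str.split₀ text).map (fun tok => dF.getD tok 0) := by
        simpa using t3 dF (subD_trans ih2 hF)
      rw [h3, hline]; simp

-- ===== VERDICT (by name: the statement is the Claim_ definition above) =====
theorem convert_data_to_integer_spec : Claim_equal_convert_data_to_integer := by
  intro train_text test_text _
  unfold Spec_convert_data_to_integer convert_data_to_integer convert_data_to_integer_alt
  have hsize : (1 : Int) = (((PySem.Dict.empty : PySem.Dict String Int).insert "<unk>" 0).size : Int) := by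
    decide
  obtain ⟨h1, _, h3⟩ :=
    textLoop train_text ((PySem.Dict.empty : PySem.Dict String Int).insert "<unk>" 0) []
  set r := train_text.foldl altText ((PySem.Dict.empty : PySem.Dict String Int).insert "<unk>" 0, [])
    with hr
  have hst : train_text.foldl (fun p text => (PySem.Str.split₀ text).foldl pyBuildTok p)
      (1, (PySem.Dict.empty : PySem.Dict String Int).insert "<unk>" 0)
      = ((r.1.size : Int), r.1) := by rw [hsize]; exact h1
  have htrain := h3 r.1 (subD_refl r.1)
  simp only [hst, List.nil_append] at *
  simp only [Prod.mk.injEq]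
  exact ⟨trivial, htrain.symm, trivial⟩
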